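-- pv_equiv track=rewrite | github.com/CrowMother/TOS-Trading-API | Modules/data.py | find_end_of_field
-- ===== SOURCE A (Python) =====
-- def find_end_of_field(json_string, field, start_search=0):
--     # Find the position of the field starting from the given index
--     field_pos = json_string.find(f'"{field}":', start_search)
--     if field_pos == -1:
--         return None, None  # Field not found
--
--     start_pos = json_string.find('{', field_pos)
--     if start_pos == -1:
--         return None, None  # Opening curly brace not found
--
--     # Track opening and closing braces to find the end of the field
--     open_braces = 1  # Count the first open brace
--     end_pos = start_pos + 1
--     while open_braces > 0 and end_pos < len(json_string):
--         if json_string[end_pos] == '{':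
--             open_braces += 1
--         elif json_string[end_pos] == '}':
--             open_braces -= 1
--         end_pos += 1
--
--     # Return the start and end positions
--     return field_pos, end_pos
-- ===== SOURCE B (Python) =====
-- def find_end_of_field(json_string, field, start_search=0):
--     field_pos = json_string.find(f'"{field}":', start_search)
--     if field_pos == -1:
--         return None, None
--     start_pos = json_string.find('{', field_pos)
--     if start_pos == -1:
--         return None, None
--     # Jump from delimiter to delimiter instead of scanning every character.
--     balance = 1
--     pos = start_pos + 1
--     while True:
--         next_open = json_string.find('{', pos)
--         next_close = json_string.find('}', pos)
--         if next_open == -1 and next_close == -1: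
--             return field_pos, len(json_string)
--         if next_close == -1 or (next_open != -1 and next_open < next_close):
--             balance += 1
--             pos = next_open + 1
--         else:
--             balance -= 1
--             pos = next_close + 1
--             if balance == 0:
--                 return field_pos, pos
-- ===== Notes on version B (the rewrite author's own statement) =====
-- stated objective: alternative
-- what changed: The character-by-character while loop counting braces is replaced by a delimiter-jumping loop: str.find locates the next '{' and the next '}' from the current position, the earlier one updates the balance and the position jumps one past it, so non-brace characters are never inspected one at a time.
import Mathlib
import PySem

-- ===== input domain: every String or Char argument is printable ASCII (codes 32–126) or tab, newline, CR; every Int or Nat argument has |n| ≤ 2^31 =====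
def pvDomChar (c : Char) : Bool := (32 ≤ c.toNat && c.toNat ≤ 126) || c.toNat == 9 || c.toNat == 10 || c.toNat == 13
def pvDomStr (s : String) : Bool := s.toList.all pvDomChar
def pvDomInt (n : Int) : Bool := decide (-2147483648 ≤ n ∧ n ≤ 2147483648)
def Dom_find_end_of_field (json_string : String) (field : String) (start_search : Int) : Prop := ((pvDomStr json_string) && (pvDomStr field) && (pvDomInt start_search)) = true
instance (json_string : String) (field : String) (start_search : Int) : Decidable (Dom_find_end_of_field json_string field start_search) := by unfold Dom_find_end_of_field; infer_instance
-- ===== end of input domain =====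

-- B replaces A's character-by-character brace counter with a delimiter-jumping loop
-- (str.find for the next '{' and '}' picks the earlier delimiter), skipping the
-- non-brace characters in bulk (objective: alternative algorithm, same result).

-- ===== PORT A =====
-- A's while loop: `while open_braces > 0 and end_pos < len(s)` scanning s[end_pos];
-- the remaining suffix s.drop end_pos is the recursion argument (nonempty ↔ end_pos < len).
def pvLoopA : List Char → Int → Int → Int
  | [], _, end_pos => end_pos
  | c :: rest, open_braces, end_pos =>
    if 0 < open_braces then
      pvLoopA rest
        (if c = '{' then open_braces + 1
         else if c = '}' then open_braces - 1 else open_braces)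
        (end_pos + 1)
    else end_pos

def find_end_of_field (json_string : String) (field : String) (start_search : Int) : Option Int × Option Int :=
  let s := json_string.toList
  -- f'"{field}":'
  let pat := '"' :: field.toList ++ ['"', ':']
  let field_pos := PySem.Chars.findFrom s pat start_search none
  if field_pos = -1 then (none, none)
  else
    let start_pos := PySem.Chars.findFrom s ['{'] field_pos none
    if start_pos = -1 then (none, none)
    else
      (some field_pos, some (pvLoopA (s.drop (start_pos + 1).toNat) 1 (start_pos + 1)))

-- ===== PORT B =====
-- B's `while True` loop; pos strictly increases and stays ≤ len(s), so
-- fuel = len(s) + 1 is never exhausted (the 0 case is unreachable).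
def pvLoopB (s : List Char) : Nat → Int → Int → Int
  | 0, _, pos => pos
  | fuel + 1, balance, pos =>
    let next_open := PySem.Chars.findFrom s ['{'] pos none
    let next_close := PySem.Chars.findFrom s ['}'] pos none
    if next_open = -1 ∧ next_close = -1 then (s.length : Int)
    else if next_close = -1 ∨ (next_open ≠ -1 ∧ next_open < next_close) then
      pvLoopB s fuel (balance + 1) (next_open + 1)
    else if balance - 1 = 0 then next_close + 1
    else pvLoopB s fuel (balance - 1) (next_close + 1)

def find_end_of_field_alt (json_string : String) (field : String) (start_search : Int) : Option Int × Option Int :=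
  let s := json_string.toList
  -- f'"{field}":'
  let pat := '"' :: field.toList ++ ['"', ':']
  let field_pos := PySem.Chars.findFrom s pat start_search none
  if field_pos = -1 then (none, none)
  else
    let start_pos := PySem.Chars.findFrom s ['{'] field_pos none
    if start_pos = -1 then (none, none)
    else
      (some field_pos, some (pvLoopB s (s.length + 1) 1 (start_pos + 1)))

-- ===== PRECONDITION & SPEC =====
def Spec_find_end_of_field (json_string : String) (field : String) (start_search : Int) (out : Option Int × Option Int) : Prop := out = find_end_of_field_alt json_string field start_search
instance (json_string : String) (field : String) (start_search : Int) (out : Option Int × Option Int) : Decidable (Spec_find_end_of_field json_string field start_search out) := by unfold Spec_find_end_of_field; infer_instance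

-- ===== CLAIM (what is proved, stated in full; the proofs are below) =====
def Claim_equal_find_end_of_field : Prop := ∀ (json_string : String) (field : String) (start_search : Int), Dom_find_end_of_field json_string field start_search → Spec_find_end_of_field json_string field start_search (find_end_of_field json_string field start_search)

-- ===== LEMMAS AND PROOFS =====

-- A's loop stops at once when the brace balance is not positive.
theorem pvLoopA_nonpos (l : List Char) (b e : Int) (hb : ¬ 0 < b) : pvLoopA l b e = e := by
  cases l <;> simp [pvLoopA, hb]

-- Scanning a brace-free prefix only advances the position.
theorem pvLoopA_append (pre suf : List Char) (b e : Int) (hb : 0 < b)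
    (hpre : ∀ c ∈ pre, c ≠ '{' ∧ c ≠ '}') :
    pvLoopA (pre ++ suf) b e = pvLoopA suf b (e + pre.length) := by
  induction pre generalizing e with
  | nil => simp
  | cons c cs ih =>
    have hc := hpre c (by simp)
    rw [List.cons_append]
    simp only [pvLoopA, if_pos hb, if_neg hc.1, if_neg hc.2]
    rw [ih (e + 1) (fun d hd => hpre d (by simp [hd]))]
    congr 1
    simp only [List.length_cons]
    push_cast
    ring

-- [c] is a prefix of t.drop i exactly when t[i] = c.
theorem prefix_singleton_drop (t : List Char) (c : Char) (i : Nat) (h : i < t.length) :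
    [c] <+: t.drop i ↔ t[i] = c := by
  rw [List.drop_eq_getElem_cons h]
  constructor
  · rintro ⟨r, hr⟩
    rw [List.singleton_append] at hr
    exact (List.cons_eq_cons.mp hr.symm).1
  · rintro rfl
    exact ⟨t.drop (i + 1), rfl⟩

-- If find t [c] = -1 then no position of t holds c.
theorem find_neg_all (t : List Char) (c : Char) (h : PySem.Chars.find t [c] = -1) :
    ∀ i, (hi : i < t.length) → t[i] ≠ c := by
  intro i hi hc
  have : [c] <:+: t := (List.singleton_infix_iff c t).mpr (hc ▸ t.getElem_mem hi)
  exact (PySem.Chars.find_eq_neg_one_iff t [c]).mp h this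

-- Characterisation of a found index: find t [c] = ↑j with t[j] = c and no c before j.
theorem find_spec_singleton (t : List Char) (c : Char) (h : PySem.Chars.find t [c] ≠ -1) :
    ∃ j : Nat, PySem.Chars.find t [c] = (j : Int) ∧ j < t.length ∧ t[j]? = some c ∧
      ∀ i, i < j → t[i]? ≠ some c := by
  have h0 : 0 ≤ PySem.Chars.find t [c] := by
    have := PySem.Chars.neg_one_le_find t [c]; omega
  obtain ⟨hpre, hmin⟩ := PySem.Chars.find_spec h0
  have hlt : (PySem.Chars.find t [c]).toNat < t.length := by
    rcases Nat.lt_or_ge (PySem.Chars.find t [c]).toNat t.length with hl | hl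
    · exact hl
    · rw [List.drop_eq_nil_of_le hl] at hpre
      simp at hpre
  refine ⟨(PySem.Chars.find t [c]).toNat, by omega, hlt, ?_, ?_⟩
  · rw [List.getElem?_eq_getElem hlt, (prefix_singleton_drop t c _ hlt).mp hpre]
  · intro i hi he
    have hil : i < t.length := by omega
    rw [List.getElem?_eq_getElem hil] at he
    exact hmin i hi ((prefix_singleton_drop t c i hil).mpr (Option.some_injective _ he))

-- One combined step of A's loop: skip to the first brace at index j, process it.
theorem pvLoopA_to_index (t : List Char) (j : Nat) (b e : Int) (hb : 0 < b)
    (hj : j < t.length) (hmin : ∀ i, (hi : i < j) → t[i]'(by omega) ≠ '{' ∧ t[i]'(by omega) ≠ '}') :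
    pvLoopA t b e =
      pvLoopA (t.drop (j + 1))
        (if t[j] = '{' then b + 1 else if t[j] = '}' then b - 1 else b)
        (e + j + 1) := by
  conv_lhs => rw [← List.take_append_drop j t]
  rw [pvLoopA_append _ _ _ _ hb (by
    intro c hc
    obtain ⟨i, hi, rfl⟩ := List.mem_take_iff_getElem.mp hc
    exact hmin i (by omega))]
  rw [List.drop_eq_getElem_cons hj]
  simp only [pvLoopA, if_pos hb]
  congr 1
  have hlen : (t.take j).length = j := by simp [List.length_take]; omega
  rw [hlen]

-- The heart: A's character scan equals B's delimiter-jumping loop.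
theorem loopAB (s : List Char) (fuel : Nat) :
    ∀ (b : Int) (p : Nat), 0 < b → p ≤ s.length → s.length - p < fuel →
      pvLoopA (s.drop p) b (p : Int) = pvLoopB s fuel b (p : Int) := by
  induction fuel with
  | zero => intro b p _ _ hf; omega
  | succ fuel ih =>
    intro b p hb hp hf
    simp only [pvLoopB]
    rw [PySem.Chars.findFrom_natCast s ['{'] p hp, PySem.Chars.findFrom_natCast s ['}'] p hp]
    set t := s.drop p with ht
    have htlen : t.length = s.length - p := by rw [ht]; simp
    by_cases ho : PySem.Chars.find t ['{'] = -1 <;>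
      by_cases hc : PySem.Chars.find t ['}'] = -1
    · -- no braces at all: A walks to the end, B returns len(s)
      rw [ho, hc, if_pos rfl, if_pos ⟨rfl, rfl⟩]
      have hall : ∀ c ∈ t, c ≠ '{' ∧ c ≠ '}' := by
        intro c hcm
        obtain ⟨i, hi, rfl⟩ := List.mem_iff_getElem.mp hcm
        exact ⟨find_neg_all t '{' ho i hi, find_neg_all t '}' hc i hi⟩
      rw [show t = t ++ [] by simp, pvLoopA_append _ _ _ _ hb hall]
      simp only [pvLoopA]
      omega
    · -- only a '}' ahead, at index jc
      obtain ⟨jc, hjc', hjcl, hjcq, hjcminq⟩ := find_spec_singleton t '}' hc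
      have hjcc : t[jc]'hjcl = '}' :=
        Option.some_injective _ (List.getElem?_eq_getElem hjcl ▸ hjcq)
      have hjcmin : ∀ i, (hi : i < jc) → t[i]'(by omega) ≠ '}' := fun i hi he =>
        hjcminq i hi (by rw [List.getElem?_eq_getElem (by omega : i < t.length), he])
      have cjc : ¬((jc : Int) = -1) := by omega
      rw [ho, hjc', if_pos rfl, if_neg cjc]
      have c1 : ¬((-1 : Int) = -1 ∧ (p : Int) + (jc : Int) = -1) := by
        rintro ⟨-, h2⟩; omega
      have c2 : ¬((p : Int) + (jc : Int) = -1 ∨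
          ((-1 : Int) ≠ -1 ∧ (-1 : Int) < (p : Int) + (jc : Int))) := by
        rintro (h1 | ⟨h2, -⟩) <;> omega
      rw [if_neg c1, if_neg c2]
      rw [pvLoopA_to_index t jc b _ hb hjcl
        (fun i hi => ⟨find_neg_all t '{' ho i (by omega), hjcmin i hi⟩)]
      rw [hjcc]
      rw [if_neg (by decide : ¬(('}' : Char) = '{')), if_pos (rfl : ('}' : Char) = '}')]
      by_cases hb1 : b - 1 = 0
      · rw [if_pos hb1, pvLoopA_nonpos _ (b - 1) _ (by omega)]
      · rw [if_neg hb1]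
        have hdrop : t.drop (jc + 1) = s.drop (p + (jc + 1)) := by
          rw [ht, List.drop_drop]
        have harg : ((p + (jc + 1) : Nat) : Int) = (p : Int) + (jc : Int) + 1 := by
          push_cast; ring
        rw [hdrop, ← harg]
        rw [ih (b - 1) (p + (jc + 1)) (by omega) (by omega) (by omega)]
    · -- only a '{' ahead, at index jo
      obtain ⟨jo, hjo, hjol, hjoq, hjominq⟩ := find_spec_singleton t '{' ho
      have hjoc : t[jo]'hjol = '{' :=
        Option.some_injective _ (List.getElem?_eq_getElem hjol ▸ hjoq)
      have hjomin : ∀ i, (hi : i < jo) → t[i]'(by omega) ≠ '{' := fun i hi he =>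
        hjominq i hi (by rw [List.getElem?_eq_getElem (by omega : i < t.length), he])
      have cjo : ¬((jo : Int) = -1) := by omega
      rw [hjo, hc, if_neg cjo, if_pos rfl]
      have c1 : ¬((p : Int) + (jo : Int) = -1 ∧ (-1 : Int) = -1) := by
        rintro ⟨h1, -⟩; omega
      rw [if_neg c1, if_pos (Or.inl rfl)]
      rw [pvLoopA_to_index t jo b _ hb hjol
        (fun i hi => ⟨hjomin i hi, find_neg_all t '}' hc i (by omega)⟩)]
      rw [hjoc]
      rw [if_pos (rfl : ('{' : Char) = '{')]
      have hdrop : t.drop (jo + 1) = s.drop (p + (jo + 1)) := by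
        rw [ht, List.drop_drop]
      have harg : ((p + (jo + 1) : Nat) : Int) = (p : Int) + (jo : Int) + 1 := by
        push_cast; ring
      rw [hdrop, ← harg]
      rw [ih (b + 1) (p + (jo + 1)) (by omega) (by omega) (by omega)]
    · -- both ahead: the earlier one decides
      obtain ⟨jo, hjo, hjol, hjoq, hjominq⟩ := find_spec_singleton t '{' ho
      obtain ⟨jc, hjc', hjcl, hjcq, hjcminq⟩ := find_spec_singleton t '}' hc
      have hjoc : t[jo]'hjol = '{' :=
        Option.some_injective _ (List.getElem?_eq_getElem hjol ▸ hjoq)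
      have hjcc : t[jc]'hjcl = '}' :=
        Option.some_injective _ (List.getElem?_eq_getElem hjcl ▸ hjcq)
      have hjomin : ∀ i, (hi : i < jo) → t[i]'(by omega) ≠ '{' := fun i hi he =>
        hjominq i hi (by rw [List.getElem?_eq_getElem (by omega : i < t.length), he])
      have hjcmin : ∀ i, (hi : i < jc) → t[i]'(by omega) ≠ '}' := fun i hi he =>
        hjcminq i hi (by rw [List.getElem?_eq_getElem (by omega : i < t.length), he])
      have hjne : jo ≠ jc := by
        intro heq
        subst heq
        rw [hjoc] at hjcc
        exact absurd hjcc (by decide)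
      have cjo : ¬((jo : Int) = -1) := by omega
      have cjc : ¬((jc : Int) = -1) := by omega
      rw [hjo, hjc', if_neg cjo, if_neg cjc]
      have c1 : ¬((p : Int) + (jo : Int) = -1 ∧ (p : Int) + (jc : Int) = -1) := by
        rintro ⟨h1, -⟩; omega
      rw [if_neg c1]
      by_cases hlt : jo < jc
      · -- '{' first
        rw [if_pos (Or.inr ⟨by omega, by omega⟩)]
        rw [pvLoopA_to_index t jo b _ hb hjol
          (fun i hi => ⟨hjomin i hi, hjcmin i (by omega)⟩)]
        rw [hjoc]
        rw [if_pos (rfl : ('{' : Char) = '{')]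
        have hdrop : t.drop (jo + 1) = s.drop (p + (jo + 1)) := by
          rw [ht, List.drop_drop]
        have harg : ((p + (jo + 1) : Nat) : Int) = (p : Int) + (jo : Int) + 1 := by
          push_cast; ring
        rw [hdrop, ← harg]
        rw [ih (b + 1) (p + (jo + 1)) (by omega) (by omega) (by omega)]
      · -- '}' first
        have hclt : jc < jo := by omega
        have c2 : ¬((p : Int) + (jc : Int) = -1 ∨
            ((p : Int) + (jo : Int) ≠ -1 ∧ (p : Int) + (jo : Int) < (p : Int) + (jc : Int))) := by
          rintro (h1 | ⟨-, h2⟩) <;> omega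
        rw [if_neg c2]
        rw [pvLoopA_to_index t jc b _ hb hjcl
          (fun i hi => ⟨hjomin i (by omega), hjcmin i hi⟩)]
        rw [hjcc]
        rw [if_neg (by decide : ¬(('}' : Char) = '{')), if_pos (rfl : ('}' : Char) = '}')]
        by_cases hb1 : b - 1 = 0
        · rw [if_pos hb1, pvLoopA_nonpos _ (b - 1) _ (by omega)]
        · rw [if_neg hb1]
          have hdrop : t.drop (jc + 1) = s.drop (p + (jc + 1)) := by
            rw [ht, List.drop_drop]
          have harg : ((p + (jc + 1) : Nat) : Int) = (p : Int) + (jc : Int) + 1 := by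
            push_cast; ring
          rw [hdrop, ← harg]
          rw [ih (b - 1) (p + (jc + 1)) (by omega) (by omega) (by omega)]

-- A findFrom result that is not -1 lies in [0, length].
theorem findFrom_bounds (s sub : List Char) (st : Int)
    (h : PySem.Chars.findFrom s sub st none ≠ -1) :
    0 ≤ PySem.Chars.findFrom s sub st none ∧ PySem.Chars.findFrom s sub st none ≤ s.length := by
  have hb1 : ∀ (K : Nat), -1 ≤ PySem.Chars.find (List.drop K (List.take ((s.length : Int)).toNat s)) sub :=
    fun K => PySem.Chars.neg_one_le_find _ _
  have hb2 : ∀ (K : Nat), PySem.Chars.find (List.drop K (List.take ((s.length : Int)).toNat s)) sub ≤ ((s.length - K : Nat) : Int) := by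
    intro K
    have hK := PySem.Chars.find_le_length (List.drop K (List.take ((s.length : Int)).toNat s)) sub
    simpa using hK
  unfold PySem.Chars.findFrom at h ⊢
  dsimp only at h ⊢
  split_ifs at h ⊢ with h1 h2 h3 h4 <;>
    first
      | exact absurd rfl h
      | (constructor <;>
          (have u1 := hb1 (if st < 0 then if st + (s.length : Int) < 0 then 0 else st + s.length else st).toNat
           have u2 := hb2 (if st < 0 then if st + (s.length : Int) < 0 then 0 else st + s.length else st).toNat
           split_ifs at u1 u2 <;> omega))

-- ===== VERDICT (by name: the statement is the Claim_ definition above) =====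
theorem find_end_of_field_spec : Claim_equal_find_end_of_field := by
  intro json_string field start_search _
  unfold Spec_find_end_of_field
  simp only [find_end_of_field, find_end_of_field_alt]
  set s := json_string.toList with hs
  set pat := '"' :: field.toList ++ ['"', ':'] with hpat
  by_cases hf : PySem.Chars.findFrom s pat start_search none = -1
  · rw [if_pos hf, if_pos hf]
  · rw [if_neg hf, if_neg hf]
    set fp := PySem.Chars.findFrom s pat start_search none with hfp
    have hfb := findFrom_bounds s pat start_search hf
    rw [← hfp] at hfb
    by_cases hsp : PySem.Chars.findFrom s ['{'] fp none = -1
    · rw [if_pos hsp, if_pos hsp]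
    · rw [if_neg hsp, if_neg hsp]
      have hfpn : fp = ((fp.toNat : Nat) : Int) := by omega
      have hknat : fp.toNat ≤ s.length := by omega
      have hspec := PySem.Chars.findFrom_natCast_spec s ['{'] fp.toNat hknat
        (by rw [← hfpn]; exact hsp)
      rw [← hfpn] at hspec
      set sp := PySem.Chars.findFrom s ['{'] fp none with hspdef
      have hsp0 : 0 ≤ sp := le_trans (by omega) hspec.1
      have hsplt : sp.toNat < s.length := by
        rcases hspec.2.1 with ⟨r, hr⟩
        rcases Nat.lt_or_ge sp.toNat s.length with hl | hl
        · exact hl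
        · rw [List.drop_eq_nil_of_le hl] at hr
          simp at hr
      have hcast : (((sp + 1).toNat : Nat) : Int) = sp + 1 := by omega
      have := loopAB s (s.length + 1) 1 (sp + 1).toNat (by omega) (by omega) (by omega)
      rw [hcast] at this
      rw [this]
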